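-- pv_equiv track=rewrite | github.com/adenau/duplicati-healthcheck-proxy | src/hcproxy/controllers/duplicati.py | parseFailedReport
-- ===== SOURCE A (Python) =====
-- def parseFailedReport(raw_report, parsed_report):
--
--     state = "Start"
--
--     for line in raw_report:
--
--         if (line[:7] == "Details"):
--             state = "Details"
--             keyvalue = line.split(":",1)
--             parsed_report["Details"] = keyvalue[1]
--
--         elif (line[:7] == "Log dat"):
--             state = "LogData"
--             keyvalue = line.split(":",1)
--             parsed_report["Log Data"] = keyvalue[1]
--
--         elif (line[:6] == "Failed"):
--             state = "Failed"
--             keyvalue = line.split(":",1)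
--             parsed_report["Failed"] = keyvalue[1]
--
--         elif (state == "Details"):
--             parsed_report["Details"] = parsed_report["Details"] + line
--
--         elif (state == "LogData"):
--             parsed_report["Log Data"] = parsed_report["Log Data"] + line
--
--     return parsed_report
-- ===== SOURCE B (Python) =====
-- def parseFailedReport(raw_report, parsed_report):
--     # Segment decomposition: walk raw_report segment by segment (a header line
--     # plus its block of continuation lines) and build each field's value at
--     # once, instead of a line-by-line state machine. Mutates parsed_report in
--     # place, like the original.
--
--     def kind(line):
--         if line.startswith("Details"):
--             return "Details"
--         if line.startswith("Log dat"):
--             return "Log Data"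
--         if line.startswith("Failed"):
--             return "Failed"
--         return None
--
--     n = len(raw_report)
--     i = 0
--     while i < n:
--         key = kind(raw_report[i])
--         if key is None:
--             i += 1           # lines before the first header are dropped
--             continue
--         value = raw_report[i].split(":", 1)[1]
--         j = i + 1            # the continuation block ends at the next header
--         while j < n and kind(raw_report[j]) is None:
--             j += 1
--         if key != "Failed":
--             value = value + "".join(raw_report[i + 1:j])
--         parsed_report[key] = value
--         i = j
--     return parsed_report
-- ===== Notes on version B (the rewrite author's own statement) =====
-- stated objective: alternative
-- what changed: B replaces A's line-by-line state-machine loop (state variable + incremental value appends) by a segment walk: it finds each header line, takes its whole continuation block at once (takeWhile/dropWhile), and builds each field's final value in one step.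
import Mathlib
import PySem

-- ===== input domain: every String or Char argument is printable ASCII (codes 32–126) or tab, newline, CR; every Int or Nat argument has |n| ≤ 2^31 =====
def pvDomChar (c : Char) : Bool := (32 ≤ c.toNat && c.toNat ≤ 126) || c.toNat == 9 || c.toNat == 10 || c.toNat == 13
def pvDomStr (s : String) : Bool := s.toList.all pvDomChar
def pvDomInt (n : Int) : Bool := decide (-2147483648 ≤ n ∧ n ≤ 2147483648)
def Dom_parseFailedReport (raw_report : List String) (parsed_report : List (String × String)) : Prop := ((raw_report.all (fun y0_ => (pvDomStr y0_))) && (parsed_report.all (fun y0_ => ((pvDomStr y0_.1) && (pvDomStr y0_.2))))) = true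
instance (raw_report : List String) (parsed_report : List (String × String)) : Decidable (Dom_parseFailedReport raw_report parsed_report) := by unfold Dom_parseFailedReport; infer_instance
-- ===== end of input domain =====

-- B replaces A's line-by-line state machine by a segment walk (header line + its
-- continuation block, value built at once); same return value and same in-place
-- update of parsed_report. Objective: alternative decomposition (same cost).

-- line.split(":", 1)[1], with [] standing in for the IndexError case (excluded by Pre_)
def pvAfterColon (l : List Char) : List Char :=
  (PySem.List.pyGet? (PySem.Chars.splitOnMax l [':'] 1) 1).getD []

-- ===== PORT A =====
-- one step of A's for-loop: state is (state, parsed_report)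
def pvStepA (st : String × PySem.Dict String (List Char)) (line : List Char) :
    String × PySem.Dict String (List Char) :=
  if PySem.List.slice line none (some 7) = "Details".toList then
    ("Details", st.2.insert "Details" (pvAfterColon line))
  else if PySem.List.slice line none (some 7) = "Log dat".toList then
    ("LogData", st.2.insert "Log Data" (pvAfterColon line))
  else if PySem.List.slice line none (some 6) = "Failed".toList then
    ("Failed", st.2.insert "Failed" (pvAfterColon line))
  else if st.1 = "Details" then
    (st.1, st.2.insert "Details" (((st.2.get? "Details").getD []) ++ line))
  else if st.1 = "LogData" then
    (st.1, st.2.insert "Log Data" (((st.2.get? "Log Data").getD []) ++ line))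
  else st

def parseFailedReport (raw_report : List String) (parsed_report : List (String × String)) : List (String × String) :=
  (((raw_report.map String.toList).foldl pvStepA
      ("Start", PySem.Dict.mk (parsed_report.map (fun p => (p.1, p.2.toList))))).2.items).map
    (fun p => (p.1, String.ofList p.2))

-- ===== PORT B =====
-- B's kind(line): which header (if any) starts the line, and its result key
def pvKind (line : List Char) : Option String :=
  if PySem.Chars.startswith line "Details".toList then some "Details"
  else if PySem.Chars.startswith line "Log dat".toList then some "Log Data"
  else if PySem.Chars.startswith line "Failed".toList then some "Failed"
  else none

-- B's while-loop: skip non-header lines; at a header, take the whole continuation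
-- block at once (split_body = takeWhile/dropWhile) and store the finished value
def pvGo (lines : List (List Char)) (d : PySem.Dict String (List Char)) :
    PySem.Dict String (List Char) :=
  match lines with
  | [] => d
  | line :: rest =>
    match pvKind line with
    | none => pvGo rest d
    | some key =>
      let v0 := pvAfterColon line
      let body := rest.takeWhile (fun l => (pvKind l).isNone)
      let rest' := rest.dropWhile (fun l => (pvKind l).isNone)
      let value := if key = "Failed" then v0 else v0 ++ body.flatten
      pvGo rest' (d.insert key value)
termination_by lines.length
decreasing_by
  · simp
  · simpa using Nat.lt_succ_of_le (List.length_dropWhile_le _ rest)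

def parseFailedReport_alt (raw_report : List String) (parsed_report : List (String × String)) : List (String × String) :=
  ((pvGo (raw_report.map String.toList)
      (PySem.Dict.mk (parsed_report.map (fun p => (p.1, p.2.toList))))).items).map
    (fun p => (p.1, String.ofList p.2))

-- ===== PRECONDITION & SPEC =====
-- Pre_ excludes exactly the inputs on which A raises IndexError: a header line
-- ("Details…", "Log dat…" or "Failed…") that contains no ':' (split(":",1)[1] fails).
def Pre_parseFailedReport (raw_report : List String) (parsed_report : List (String × String)) : Prop :=
  ∀ l ∈ raw_report, (pvKind l.toList).isSome → PySem.Chars.isIn [':'] l.toList = true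
instance (raw_report : List String) (parsed_report : List (String × String)) : Decidable (Pre_parseFailedReport raw_report parsed_report) := by unfold Pre_parseFailedReport; infer_instance

def pvWitness_parseFailedReport : List String × (List (String × String)) :=
  (["Failed: 2 files", "Details: disk", " was full", "Log data:", "x=1"], [("Began", "today")])

def Spec_parseFailedReport (raw_report : List String) (parsed_report : List (String × String)) (out : List (String × String)) : Prop := out = parseFailedReport_alt raw_report parsed_report
instance (raw_report : List String) (parsed_report : List (String × String)) (out : List (String × String)) : Decidable (Spec_parseFailedReport raw_report parsed_report out) := by unfold Spec_parseFailedReport; infer_instance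

-- ===== CLAIM (what is proved, stated in full; the proofs are below) =====
def Claim_equal_parseFailedReport : Prop := ∀ (raw_report : List String) (parsed_report : List (String × String)), Dom_parseFailedReport raw_report parsed_report → Pre_parseFailedReport raw_report parsed_report → Spec_parseFailedReport raw_report parsed_report (parseFailedReport raw_report parsed_report)

-- ===== LEMMAS AND PROOFS =====

-- a prefix test written as 'line[:n] == p' (with n = len(p)) is startswith
theorem pv_slice_eq_iff_startswith (l p : List Char) (b : Int) (hb : 0 ≤ b)
    (hp : (p.length : Int) = b) :
    (PySem.List.slice l none (some b) = p) ↔ PySem.Chars.startswith l p = true := by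
  rw [PySem.List.slice_to l hb, PySem.Chars.startswith_iff, List.prefix_iff_eq_take]
  have : b.toNat = p.length := by omega
  rw [this]
  exact eq_comm

theorem pv_stepA_det (st : String × PySem.Dict String (List Char)) (l : List Char)
    (h : pvKind l = some "Details") :
    pvStepA st l = ("Details", st.2.insert "Details" (pvAfterColon l)) := by
  unfold pvKind at h
  split_ifs at h with h1 h2 h3 <;> simp_all
  · unfold pvStepA
    rw [if_pos ((pv_slice_eq_iff_startswith l "Details".toList 7 (by omega) (by decide)).2 h1)]

theorem pv_stepA_log (st : String × PySem.Dict String (List Char)) (l : List Char)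
    (h : pvKind l = some "Log Data") :
    pvStepA st l = ("LogData", st.2.insert "Log Data" (pvAfterColon l)) := by
  unfold pvKind at h
  split_ifs at h with h1 h2 h3
  · exact absurd (Option.some.inj h) (by decide)
  · unfold pvStepA
    rw [if_neg, if_pos ((pv_slice_eq_iff_startswith l "Log dat".toList 7 (by omega) (by decide)).2 h2)]
    intro hc
    exact h1 ((pv_slice_eq_iff_startswith l "Details".toList 7 (by omega) (by decide)).1 hc)
  · exact absurd (Option.some.inj h) (by decide)

theorem pv_stepA_failed (st : String × PySem.Dict String (List Char)) (l : List Char)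
    (h : pvKind l = some "Failed") :
    pvStepA st l = ("Failed", st.2.insert "Failed" (pvAfterColon l)) := by
  unfold pvKind at h
  split_ifs at h with h1 h2 h3
  · exact absurd (Option.some.inj h) (by decide)
  · exact absurd (Option.some.inj h) (by decide)
  · unfold pvStepA
    rw [if_neg, if_neg, if_pos ((pv_slice_eq_iff_startswith l "Failed".toList 6 (by omega) (by decide)).2 h3)]
    · intro hc
      exact h2 ((pv_slice_eq_iff_startswith l "Log dat".toList 7 (by omega) (by decide)).1 hc)
    · intro hc
      exact h1 ((pv_slice_eq_iff_startswith l "Details".toList 7 (by omega) (by decide)).1 hc)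

theorem pv_stepA_none (st : String × PySem.Dict String (List Char)) (l : List Char)
    (h : pvKind l = none) (h1 : st.1 ≠ "Details") (h2 : st.1 ≠ "LogData") :
    pvStepA st l = st := by
  unfold pvKind at h
  split_ifs at h with g1 g2 g3
  unfold pvStepA
  rw [if_neg, if_neg, if_neg, if_neg h1, if_neg h2]
  · intro hc
    exact g3 ((pv_slice_eq_iff_startswith l "Failed".toList 6 (by omega) (by decide)).1 hc)
  · intro hc
    exact g2 ((pv_slice_eq_iff_startswith l "Log dat".toList 7 (by omega) (by decide)).1 hc)
  · intro hc
    exact g1 ((pv_slice_eq_iff_startswith l "Details".toList 7 (by omega) (by decide)).1 hc)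

theorem pv_stepA_cont (st : String) (d : PySem.Dict String (List Char)) (l : List Char)
    (h : pvKind l = none) (key : String)
    (hk : (st = "Details" ∧ key = "Details") ∨ (st = "LogData" ∧ key = "Log Data")) :
    pvStepA (st, d) l = (st, d.insert key (((d.get? key).getD []) ++ l)) := by
  unfold pvKind at h
  split_ifs at h with g1 g2 g3
  unfold pvStepA
  rw [if_neg, if_neg, if_neg]
  · rcases hk with ⟨hst, hkey⟩ | ⟨hst, hkey⟩
    · subst hst hkey; simp
    · subst hst hkey; simp
  · intro hc
    exact g3 ((pv_slice_eq_iff_startswith l "Failed".toList 6 (by omega) (by decide)).1 hc)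
  · intro hc
    exact g2 ((pv_slice_eq_iff_startswith l "Log dat".toList 7 (by omega) (by decide)).1 hc)
  · intro hc
    exact g1 ((pv_slice_eq_iff_startswith l "Details".toList 7 (by omega) (by decide)).1 hc)

-- A's loop over the continuation block of a Details/Log-dat header appends the
-- block's concatenation to the value the header just stored
theorem pv_body_cont (body : List (List Char)) :
    ∀ (d : PySem.Dict String (List Char)) (st key : String) (v : List Char),
    (∀ l ∈ body, pvKind l = none) →
    ((st = "Details" ∧ key = "Details") ∨ (st = "LogData" ∧ key = "Log Data")) →
    body.foldl pvStepA (st, d.insert key v) = (st, d.insert key (v ++ body.flatten)) := by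
  induction body with
  | nil => intro d st key v _ _; simp
  | cons l body ih =>
    intro d st key v hnone hk
    have h1 : pvKind l = none := hnone l (by simp)
    rw [List.foldl_cons, pv_stepA_cont st (d.insert key v) l h1 key hk]
    simp only [PySem.Dict.get?_insert_self, Option.getD_some]
    rw [PySem.Dict.insert_insert_self]
    rw [ih d st key (v ++ l) (fun x hx => hnone x (by simp [hx])) hk]
    simp

-- A's loop ignores the continuation block of a Failed header
theorem pv_body_failed (body : List (List Char)) :
    ∀ (d : PySem.Dict String (List Char)),
    (∀ l ∈ body, pvKind l = none) →
    body.foldl pvStepA ("Failed", d) = ("Failed", d) := by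
  induction body with
  | nil => intro d _; simp
  | cons l body ih =>
    intro d hnone
    rw [List.foldl_cons, pv_stepA_none ("Failed", d) l (hnone l (by simp)) (by simp) (by simp)]
    exact ih d (fun x hx => hnone x (by simp [hx]))

theorem pv_dropWhile_head {α : Type} (p : α → Bool) (t : List α) (a : α) (ts : List α)
    (h : t.dropWhile p = a :: ts) : p a = false := by
  induction t with
  | nil => simp at h
  | cons x xs ih =>
    rw [List.dropWhile_cons] at h
    split at h
    · exact ih h
    · rw [List.cons_eq_cons] at h
      rw [← h.1]
      simpa using ‹¬ p x = true›

-- main invariant: from any state that is not mid-Details/mid-LogData (or when the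
-- next line is a header anyway), A's remaining fold computes B's segment walk
theorem pv_main (n : Nat) : ∀ (lines : List (List Char)) (st : String)
    (d : PySem.Dict String (List Char)), lines.length ≤ n →
    ((st ≠ "Details" ∧ st ≠ "LogData") ∨ (∃ a t, lines = a :: t ∧ (pvKind a).isSome)) →
    (lines.foldl pvStepA (st, d)).2 = pvGo lines d := by
  induction n with
  | zero =>
    intro lines st d hlen _
    have : lines = [] := List.eq_nil_of_length_eq_zero (Nat.le_zero.1 hlen)
    subst this
    simp [pvGo]
  | succ n ih =>
    intro lines st d hlen hok
    match lines with
    | [] => simp [pvGo]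
    | a :: t =>
      cases hka : pvKind a with
      | none =>
        have hst : st ≠ "Details" ∧ st ≠ "LogData" := by
          rcases hok with h | ⟨a', t', he, hs⟩
          · exact h
          · rw [List.cons_eq_cons] at he
            rw [he.1] at hka
            rw [hka] at hs
            simp at hs
        rw [List.foldl_cons, pv_stepA_none (st, d) a hka hst.1 hst.2]
        rw [pvGo, hka]
        exact ih t st d (by simpa using Nat.lt_succ_iff.1 (by simpa using hlen)) (Or.inl hst)
      | some key =>
        -- split t into the continuation block and the rest
        have hsplit : t = t.takeWhile (fun l => (pvKind l).isNone) ++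
            t.dropWhile (fun l => (pvKind l).isNone) :=
          (List.takeWhile_append_dropWhile).symm
        have hbody : ∀ l ∈ t.takeWhile (fun l => (pvKind l).isNone), pvKind l = none := by
          intro l hl
          have := List.mem_takeWhile_imp (p := fun l => (pvKind l).isNone) hl
          simpa [Option.isNone_iff_eq_none] using this
        have hlen' : (t.dropWhile (fun l => (pvKind l).isNone)).length ≤ n := by
          have := List.length_dropWhile_le (fun l => (pvKind l).isNone) t
          simp at hlen
          omega
        have hrec : ∀ d' : PySem.Dict String (List Char),
            ((t.dropWhile (fun l => (pvKind l).isNone)).foldl pvStepA (pvStepA (st, d) a |>.1, d') |>.2) =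
              pvGo (t.dropWhile (fun l => (pvKind l).isNone)) d' := by
          intro d'
          rcases heq : t.dropWhile (fun l => (pvKind l).isNone) with _ | ⟨a', t'⟩
          · rw [pvGo]; rfl
          · have hs : (pvKind a').isSome := by
              have := pv_dropWhile_head (fun l => (pvKind l).isNone) t a' t' heq
              simpa [Option.isNone_iff_eq_none, ← Option.ne_none_iff_isSome] using this
            exact ih _ _ d' (heq ▸ hlen') (Or.inr ⟨a', t', rfl, hs⟩)
        -- evaluate the header step, then the block, then recurse
        rw [List.foldl_cons]
        rw [pvGo, hka]
        -- three header kinds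
        have hkey : key = "Details" ∨ key = "Log Data" ∨ key = "Failed" := by
          unfold pvKind at hka
          split_ifs at hka
          all_goals first
            | exact Or.inl (Option.some.inj hka).symm
            | exact Or.inr (Or.inl (Option.some.inj hka).symm)
            | exact Or.inr (Or.inr (Option.some.inj hka).symm)
        rcases hkey with hk | hk | hk <;> subst hk
        · rw [pv_stepA_det (st, d) a hka]
          conv_lhs => rw [hsplit, List.foldl_append]
          rw [pv_body_cont _ d "Details" "Details" (pvAfterColon a) hbody (Or.inl ⟨rfl, rfl⟩)]
          have := hrec (d.insert "Details" (pvAfterColon a ++ (t.takeWhile (fun l => (pvKind l).isNone)).flatten))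
          rw [pv_stepA_det (st, d) a hka] at this
          simp only at this ⊢
          rw [this]
          simp
        · rw [pv_stepA_log (st, d) a hka]
          conv_lhs => rw [hsplit, List.foldl_append]
          rw [pv_body_cont _ d "LogData" "Log Data" (pvAfterColon a) hbody (Or.inr ⟨rfl, rfl⟩)]
          have := hrec (d.insert "Log Data" (pvAfterColon a ++ (t.takeWhile (fun l => (pvKind l).isNone)).flatten))
          rw [pv_stepA_log (st, d) a hka] at this
          simp only at this ⊢
          rw [this]
          simp
        · rw [pv_stepA_failed (st, d) a hka]
          conv_lhs => rw [hsplit, List.foldl_append]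
          rw [pv_body_failed _ _ hbody]
          have := hrec (d.insert "Failed" (pvAfterColon a))
          rw [pv_stepA_failed (st, d) a hka] at this
          simp only at this ⊢
          rw [this]
          simp

-- ===== VERDICT (by name: the statement is the Claim_ definition above) =====
theorem parseFailedReport_spec : Claim_equal_parseFailedReport := by
  intro raw_report parsed_report _ _
  unfold Spec_parseFailedReport parseFailedReport parseFailedReport_alt
  rw [pv_main (raw_report.map String.toList).length _ "Start" _ le_rfl
    (Or.inl ⟨by decide, by decide⟩)]
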